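-- pv_equiv track=rewrite | github.com/brikjr/CodonBERT | Pre-FF/create_expression_dataset.py | count_kozak_like_sequences
-- ===== SOURCE A (Python) =====
-- def count_kozak_like_sequences(seq):
--     """Count Kozak-like sequences in a given RNA sequence."""
--     # Basic Kozak consensus: GCCACCAUGG
--     kozak_pattern = 'GCCACCAUGG'
--     count = 0
--     for i in range(len(seq) - len(kozak_pattern) + 1):
--         window = seq[i:i+len(kozak_pattern)]
--         matches = sum(1 for a, b in zip(window, kozak_pattern) if a == b)
--         if matches >= 7:  # Allow for some mismatches
--             count += 1
--     return count
-- ===== SOURCE B (Python) =====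
-- def count_kozak_like_sequences(seq):
--     """Count Kozak-like sequences in a given RNA sequence."""
--     # Basic Kozak consensus: GCCACCAUGG
--     kozak_pattern = 'GCCACCAUGG'
--     m = max(0, len(seq) - len(kozak_pattern) + 1)
--     counts = [0] * m
--     for p, j in zip(kozak_pattern, range(len(kozak_pattern))):
--         for i in range(m):
--             if seq[i + j] == p:
--                 counts[i] += 1
--     return sum(1 for c in counts if c >= 7)
-- ===== Notes on version B (the rewrite author's own statement) =====
-- stated objective: alternative
-- what changed: Replaces A's per-window inline match summation (slice each window, zip with the pattern, count, test >=7 immediately) by a column-wise accumulation: an integer counts table of length max(0, len(seq)-9) is filled by looping over pattern positions in the outer loop and window starts in the inner loop, and the >=7 threshold is applied in a separate final scan over the table.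
import Mathlib
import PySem

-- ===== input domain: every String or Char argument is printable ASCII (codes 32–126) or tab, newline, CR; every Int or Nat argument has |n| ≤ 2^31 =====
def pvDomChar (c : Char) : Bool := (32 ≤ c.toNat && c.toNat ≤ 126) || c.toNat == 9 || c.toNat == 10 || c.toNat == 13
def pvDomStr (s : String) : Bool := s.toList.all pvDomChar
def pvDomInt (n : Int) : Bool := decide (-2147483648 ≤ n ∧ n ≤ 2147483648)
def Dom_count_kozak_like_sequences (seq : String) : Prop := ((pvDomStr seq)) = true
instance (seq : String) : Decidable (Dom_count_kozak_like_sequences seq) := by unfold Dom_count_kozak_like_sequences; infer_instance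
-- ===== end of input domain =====

-- B replaces A's per-window inline match sums by a column-wise maintained counts table
-- (outer loop over pattern positions, inner over window starts) scanned in a separate
-- final pass; objective: alternative decomposition, same asymptotic cost.

-- ===== PORT A =====
def kozakPattern : List Char := "GCCACCAUGG".toList

def count_kozak_like_sequences (seq : String) : Int :=
  let s := seq.toList
  (PySem.List.pyRange 0 ((s.length : Int) - (kozakPattern.length : Int) + 1) 1).foldl
    (fun count i =>
      let window := PySem.List.slice s (some i) (some (i + (kozakPattern.length : Int)))
      let matchCnt : Int := (window.zip kozakPattern).foldl
        (fun acc ab => if ab.1 = ab.2 then acc + 1 else acc) 0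
      if 7 ≤ matchCnt then count + 1 else count) 0

-- ===== PORT B =====
-- m = max(0, len(seq) - len(kozak_pattern) + 1)
def kozakM (n : Nat) : Nat := if kozakPattern.length ≤ n then n - kozakPattern.length + 1 else 0

-- seq[i + j] is ported as List.getD; exact here since 0 ≤ i + j < len(seq) for every
-- i < m, j < len(pattern) reached by the loops.
def count_kozak_like_sequences_alt (seq : String) : Int :=
  let s := seq.toList
  let m : Nat := kozakM s.length
  let counts : List Int :=
    kozakPattern.zipIdx.foldl (fun counts pj =>
      (List.range m).foldl (fun counts i =>
        if s.getD (i + pj.2) ' ' = pj.1 then counts.set i (counts.getD i 0 + 1) else counts)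
        counts)
      (List.replicate m (0 : Int))
  counts.foldl (fun acc c => if 7 ≤ c then acc + 1 else acc) 0

-- ===== PRECONDITION & SPEC =====
def Spec_count_kozak_like_sequences (seq : String) (out : Int) : Prop := out = count_kozak_like_sequences_alt seq
instance (seq : String) (out : Int) : Decidable (Spec_count_kozak_like_sequences seq out) := by unfold Spec_count_kozak_like_sequences; infer_instance

-- ===== CLAIM (what is proved, stated in full; the proofs are below) =====
def Claim_equal_count_kozak_like_sequences : Prop := ∀ (seq : String), Dom_count_kozak_like_sequences seq → Spec_count_kozak_like_sequences seq (count_kozak_like_sequences seq)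

-- ===== LEMMAS AND PROOFS =====

-- foldl that adds 1 when a predicate holds is a countP
theorem foldl_count_ite {α : Type} (p : α → Prop) [DecidablePred p] (l : List α) (a : Int) :
    l.foldl (fun acc x => if p x then acc + 1 else acc) a = a + (l.countP (fun x => decide (p x)) : Int) := by
  induction l generalizing a with
  | nil => simp
  | cons x xs ih =>
    simp only [List.foldl_cons, List.countP_cons, ih]
    by_cases h : p x <;> simp [h] <;> push_cast <;> ring

-- the inner loop preserves list length
theorem inner_length (cond : Nat → Prop) [DecidablePred cond] :
    ∀ (ns : List Nat) (l : List Int),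
      (ns.foldl (fun l i => if cond i then l.set i (l.getD i 0 + 1) else l) l).length = l.length := by
  intro ns
  induction ns with
  | nil => intro l; rfl
  | cons n ns ih =>
    intro l
    simp only [List.foldl_cons]
    by_cases h : cond n
    · rw [if_pos h, ih, List.length_set]
    · rw [if_neg h, ih]

-- effect of the inner loop on one cell
theorem inner_getD (cond : Nat → Prop) [DecidablePred cond] :
    ∀ (ns : List Nat) (l : List Int) (i : Nat), i < l.length →
      (ns.foldl (fun l i' => if cond i' then l.set i' (l.getD i' 0 + 1) else l) l).getD i 0
        = l.getD i 0 + (ns.countP (fun i' => i' == i && decide (cond i')) : Int) := by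
  intro ns
  induction ns with
  | nil => intro l i _; simp
  | cons n ns ih =>
    intro l i hi
    simp only [List.foldl_cons, List.countP_cons]
    by_cases h : cond n
    · have hlen : (l.set n (l.getD n 0 + 1)).length = l.length := List.length_set
      rw [if_pos h, ih _ i (by omega)]
      by_cases hni : n = i
      · subst hni
        have : (l.set n (l.getD n 0 + 1)).getD n 0 = l.getD n 0 + 1 := by
          simp [List.getD_eq_getElem?_getD, List.getElem?_set, hi]
        rw [this]
        simp [h]
        push_cast; ring
      · have : (l.set n (l.getD n 0 + 1)).getD i 0 = l.getD i 0 := by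
          simp [List.getD_eq_getElem?_getD, List.getElem?_set, hni]
        rw [this]
        simp [hni]
    · rw [if_neg h, ih _ i hi]
      simp [h]

-- counting hits of a single index among range m
theorem countP_range_eq (cond : Nat → Prop) [DecidablePred cond] (m i : Nat) (hi : i < m) :
    ((List.range m).countP (fun i' => i' == i && decide (cond i'))) = if cond i then 1 else 0 := by
  by_cases h : cond i
  · rw [if_pos h]
    have : ((List.range m).countP (fun i' => i' == i && decide (cond i')))
        = ((List.range m).countP (fun i' => i' == i)) := by
      apply List.countP_congr
      intro x _
      constructor
      · intro hx; simp at hx ⊢; exact hx.1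
      · intro hx; simp at hx; subst hx; simp [h]
    rw [this]
    have := @List.count_range i m
    rw [if_pos hi] at this
    simpa [List.count] using this
  · rw [if_neg h]
    apply List.countP_eq_zero.mpr
    intro x _
    simp only [Bool.and_eq_true, beq_iff_eq, decide_eq_true_eq]
    rintro ⟨rfl, hx⟩
    exact h hx

-- effect of the outer loop: each cell accumulates the matches of its window
theorem outer_getD (s : List Char) (m : Nat) :
    ∀ (pjs : List (Char × Nat)) (l : List Int), l.length = m →
      (pjs.foldl (fun counts pj =>
          (List.range m).foldl (fun counts i =>
            if s.getD (i + pj.2) ' ' = pj.1 then counts.set i (counts.getD i 0 + 1) else counts)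
            counts) l).length = m ∧
      ∀ i, i < m →
        (pjs.foldl (fun counts pj =>
            (List.range m).foldl (fun counts i =>
              if s.getD (i + pj.2) ' ' = pj.1 then counts.set i (counts.getD i 0 + 1) else counts)
              counts) l).getD i 0
          = l.getD i 0 + (pjs.countP (fun pj => decide (s.getD (i + pj.2) ' ' = pj.1)) : Int) := by
  intro pjs
  induction pjs with
  | nil => intro l hl; exact ⟨hl, by simp⟩
  | cons pj pjs ih =>
    intro l hl
    simp only [List.foldl_cons]
    set cond : Nat → Prop := fun i => s.getD (i + pj.2) ' ' = pj.1 with hcond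
    have hlen : ((List.range m).foldl (fun counts i =>
        if s.getD (i + pj.2) ' ' = pj.1 then counts.set i (counts.getD i 0 + 1) else counts) l).length = m := by
      rw [inner_length cond (List.range m) l]; exact hl
    obtain ⟨h1, h2⟩ := ih _ hlen
    refine ⟨h1, ?_⟩
    intro i hi
    rw [h2 i hi, inner_getD cond (List.range m) l i (by omega),
        countP_range_eq cond m i hi, List.countP_cons]
    simp [hcond]
    ring

-- A's per-window zip count equals the column-indexed count
theorem zip_count (s : List Char) :
    ∀ (pat : List Char) (i j : Nat), i + j + pat.length ≤ s.length →
      (((s.drop (i + j)).take pat.length).zip pat).countP (fun ab => decide (ab.1 = ab.2))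
        = (pat.zipIdx j).countP (fun pj => decide (s.getD (i + pj.2) ' ' = pj.1)) := by
  intro pat
  induction pat with
  | nil => intro i j _; simp
  | cons p pat ih =>
    intro i j h
    have hij : i + j < s.length := by simp at h; omega
    rw [List.drop_eq_getElem_cons hij]
    simp only [List.length_cons, List.take_succ_cons, List.zip_cons_cons, List.zipIdx_cons,
      List.countP_cons]
    have hrest : (s.drop (i + j + 1)) = s.drop (i + (j + 1)) := by ring_nf
    rw [hrest, ih i (j + 1) (by simp at h ⊢; omega)]
    have hgetD : s[i + j]?.getD ' ' = s[i + j] := by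
      rw [List.getElem?_eq_getElem hij]; rfl
    simp [List.getD_eq_getElem?_getD, hgetD]

-- ===== VERDICT (by name: the statement is the Claim_ definition above) =====
theorem count_kozak_like_sequences_spec : Claim_equal_count_kozak_like_sequences := by
  intro seq _
  unfold Spec_count_kozak_like_sequences count_kozak_like_sequences count_kozak_like_sequences_alt
  dsimp only
  set s := seq.toList with hs
  set n := s.length with hn
  set m := kozakM n with hm
  have hL : kozakPattern.length = 10 := rfl
  -- A side: turn the pyRange fold into a countP over List.range m
  have hb : (((n : Int) - (kozakPattern.length : Int) + 1) - 0).toNat = m := by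
    rw [hL, hm]; unfold kozakM; rw [hL]; split <;> omega
  rw [PySem.List.pyRange_one, hb, List.foldl_map]
  have hA := foldl_count_ite (fun k : Nat =>
    (7 : Int) ≤ ((PySem.List.slice s (some ((0 : Int) + (k : Int))) (some ((0 : Int) + (k : Int) + (kozakPattern.length : Int)))).zip kozakPattern).foldl
      (fun acc ab => if ab.1 = ab.2 then acc + 1 else acc) 0) (List.range m) 0
  rw [hA, zero_add]
  -- B side: identify the counts table, then its final scan
  obtain ⟨hlen, hget⟩ := outer_getD s m kozakPattern.zipIdx (List.replicate m (0 : Int)) (by simp)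
  set C : List Int := kozakPattern.zipIdx.foldl (fun counts pj =>
      (List.range m).foldl (fun counts i =>
        if s.getD (i + pj.2) ' ' = pj.1 then counts.set i (counts.getD i 0 + 1) else counts)
        counts) (List.replicate m (0 : Int)) with hC
  have hCmap : C = (List.range m).map (fun i =>
      ((kozakPattern.zipIdx.countP (fun pj => decide (s.getD (i + pj.2) ' ' = pj.1))) : Int)) := by
    apply List.ext_getElem
    · simp [hlen]
    · intro i h1 h2
      have hi : i < m := by simpa [hlen] using h1
      have := hget i hi
      rw [List.getD_eq_getElem?_getD, List.getElem?_eq_getElem h1] at this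
      simp at this
      simp [this]
  rw [hCmap, List.foldl_map,
      foldl_count_ite (fun i : Nat =>
        (7 : Int) ≤ ((kozakPattern.zipIdx.countP (fun pj => decide (s.getD (i + pj.2) ' ' = pj.1))) : Int)) (List.range m) 0,
      zero_add]
  -- the two predicates agree on every k < m
  congr 1
  apply List.countP_congr
  intro k hk
  have hkm : k < m := by simpa using hk
  have hbound : k + 0 + kozakPattern.length ≤ s.length := by
    rw [hL]; rw [hm] at hkm; unfold kozakM at hkm; rw [hL] at hkm
    by_cases h10 : 10 ≤ n
    · simp [h10] at hkm; omega
    · simp [h10] at hkm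
  have hslice : PySem.List.slice s (some ((0 : Int) + (k : Int))) (some ((0 : Int) + (k : Int) + (kozakPattern.length : Int)))
      = (s.drop k).take kozakPattern.length := by
    rw [zero_add]
    exact PySem.List.slice_natCast_add s k kozakPattern.length
  have hmatch : (((s.drop k).take kozakPattern.length).zip kozakPattern).foldl
      (fun acc ab => if ab.1 = ab.2 then acc + 1 else acc) (0 : Int)
      = ((kozakPattern.zipIdx.countP (fun pj => decide (s.getD (k + pj.2) ' ' = pj.1))) : Int) := by
    rw [foldl_count_ite (fun ab : Char × Char => ab.1 = ab.2), zero_add]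
    have := zip_count s kozakPattern k 0 hbound
    simp only [Nat.add_zero] at this
    rw [this]
  simp only [hslice, hmatch]
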